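-- pv_equiv track=rewrite | github.com/nnocturnnn/py-leetcode-solutions | 2432-number-of-zero-filled-subarrays/2023-03-21 02.54.50 - Time Limit Exceeded - runtime NA - memory NA.py | count_overlapping
-- ===== SOURCE A (Python) =====
-- def count_overlapping(nums, subarray):
--     count = 0
--     target_sum = sum(subarray)
--     rolling_sum = sum(nums[:len(subarray)])
--     for i in range(len(nums)-len(subarray)):
--         if rolling_sum == target_sum and nums[i:i+len(subarray)] == subarray:
--             count += 1
--         rolling_sum -= nums[i]
--         rolling_sum += nums[i+len(subarray)]
--     if rolling_sum == target_sum and nums[-len(subarray):] == subarray: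
--         count += 1
--     return count
-- ===== SOURCE B (Python) =====
-- def count_overlapping(nums, subarray):
--     m = len(subarray)
--     return sum(nums[i:i+m] == subarray for i in range(len(nums) - m + 1))
-- ===== Notes on version B (the rewrite author's own statement) =====
-- stated objective: simpler
-- what changed: Replaced the rolling-sum filter loop with a split-out last iteration by a single direct count of all window positions whose slice equals the pattern.
-- intended difference: On an empty subarray with nonempty nums, A returns len(nums) (its loop misses the final empty window), while B returns len(nums)+1, the standard count of empty-pattern occurrences. — e.g. on count_overlapping([5], []): A returns 1, B returns 2
import Mathlib
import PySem

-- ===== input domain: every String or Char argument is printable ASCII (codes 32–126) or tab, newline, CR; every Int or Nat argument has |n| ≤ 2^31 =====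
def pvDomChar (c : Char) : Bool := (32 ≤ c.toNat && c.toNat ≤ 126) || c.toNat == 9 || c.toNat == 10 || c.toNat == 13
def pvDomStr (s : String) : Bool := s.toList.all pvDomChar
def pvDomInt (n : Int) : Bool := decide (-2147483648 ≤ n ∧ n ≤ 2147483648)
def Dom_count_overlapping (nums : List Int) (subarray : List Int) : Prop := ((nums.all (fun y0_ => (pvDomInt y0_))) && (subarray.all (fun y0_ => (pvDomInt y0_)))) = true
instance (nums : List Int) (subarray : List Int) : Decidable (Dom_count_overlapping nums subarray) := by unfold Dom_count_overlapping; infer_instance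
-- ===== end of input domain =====

-- B replaces A's rolling-sum-filtered loop (with a split-out last iteration) by one direct
-- count of window positions whose slice equals the pattern: simpler, same exact results
-- except on the empty pattern (see D_ below).

-- ===== PORT A =====
def count_overlapping (nums : List Int) (subarray : List Int) : Int :=
  let target_sum : Int := subarray.sum
  let rolling_sum0 : Int := (PySem.List.slice nums none (some (subarray.length : Int))).sum
  let st :=
    (PySem.List.pyRange 0 ((nums.length : Int) - (subarray.length : Int)) 1).foldl
      (fun (st : Int × Int) i =>
        let count :=
          if st.2 = target_sum ∧
              PySem.List.slice nums (some i) (some (i + (subarray.length : Int))) = subarray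
          then st.1 + 1 else st.1
        -- nums[i] and nums[i+len(subarray)] are in range whenever the loop runs (0 ≤ i < n-m)
        (count, st.2 - PySem.List.pyGetD nums i 0
                     + PySem.List.pyGetD nums (i + (subarray.length : Int)) 0))
      (0, rolling_sum0)
  if st.2 = target_sum ∧
      PySem.List.slice nums (some (-(subarray.length : Int))) none = subarray
  then st.1 + 1 else st.1

-- ===== PORT B =====
def count_overlapping_alt (nums : List Int) (subarray : List Int) : Int :=
  ((PySem.List.pyRange 0 ((nums.length : Int) - (subarray.length : Int) + 1) 1).map
    (fun i =>
      if PySem.List.slice nums (some i) (some (i + (subarray.length : Int))) = subarray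
      then (1 : Int) else 0)).sum

-- ===== PRECONDITION & SPEC =====
-- On an empty subarray with nonempty nums, A returns len(nums) (its loop misses the final
-- empty window), while B returns len(nums)+1, the standard count of empty-pattern occurrences.
def D_count_overlapping (nums : List Int) (subarray : List Int) : Prop :=
  subarray = [] ∧ nums ≠ []
instance (nums : List Int) (subarray : List Int) : Decidable (D_count_overlapping nums subarray) := by
  unfold D_count_overlapping; infer_instance

def Spec_count_overlapping (nums : List Int) (subarray : List Int) (out : Int) : Prop :=
  ¬ D_count_overlapping nums subarray → out = count_overlapping_alt nums subarray
instance (nums : List Int) (subarray : List Int) (out : Int) : Decidable (Spec_count_overlapping nums subarray out) := by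
  unfold Spec_count_overlapping; infer_instance

def pvDiffWitness_count_overlapping : List Int × List Int := ([5], [])
def pvDiffWitnessOut_count_overlapping : Int × Int := (1, 2)

-- ===== CLAIM (what is proved, stated in full; the proofs are below) =====
def Claim_unchanged_count_overlapping : Prop := ∀ (nums : List Int) (subarray : List Int), Dom_count_overlapping nums subarray → Spec_count_overlapping nums subarray (count_overlapping nums subarray)
def Claim_changed_count_overlapping : Prop := Dom_count_overlapping (pvDiffWitness_count_overlapping.1) (pvDiffWitness_count_overlapping.2) ∧ D_count_overlapping (pvDiffWitness_count_overlapping.1) (pvDiffWitness_count_overlapping.2) ∧ count_overlapping (pvDiffWitness_count_overlapping.1) (pvDiffWitness_count_overlapping.2) = pvDiffWitnessOut_count_overlapping.1 ∧ count_overlapping_alt (pvDiffWitness_count_overlapping.1) (pvDiffWitness_count_overlapping.2) = pvDiffWitnessOut_count_overlapping.2 ∧ pvDiffWitnessOut_count_overlapping.1 ≠ pvDiffWitnessOut_count_overlapping.2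
def Claim_exact_count_overlapping : Prop := ∀ (nums : List Int) (subarray : List Int), Dom_count_overlapping nums subarray → D_count_overlapping nums subarray → count_overlapping nums subarray ≠ count_overlapping_alt nums subarray

-- ===== LEMMAS AND PROOFS =====

-- the m-window of nums starting at j
def pvWin (nums subarray : List Int) (j : Nat) : List Int :=
  (nums.drop j).take subarray.length

lemma pvWin_slice (nums subarray : List Int) (j : Nat) :
    PySem.List.slice nums (some (j : Int)) (some ((j : Int) + (subarray.length : Int))) = pvWin nums subarray j := by
  simpa [pvWin] using PySem.List.slice_natCast_add nums j subarray.length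

-- pure-list rolling step: window sum at j, minus l[j], plus l[j+m] = window sum at j+1
lemma pvSum_window_step (l : List Int) (j m : Nat) (h : j + m < l.length) :
    ((l.drop j).take m).sum - l[j]'(by omega) + l[(j + m)]'h = ((l.drop (j+1)).take m).sum := by
  rcases Nat.eq_zero_or_pos m with hm | hm
  · subst hm; simp
  · obtain ⟨mm, rfl⟩ : ∃ mm, m = mm + 1 := ⟨m - 1, by omega⟩
    have hjn : j < l.length := by omega
    have h1 : l.drop j = l[j]'(by omega) :: l.drop (j+1) := List.drop_eq_getElem_cons hjn
    have h2 : (l.drop (j+1)).take (mm+1)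
        = (l.drop (j+1)).take mm ++ ((l.drop (j+1))[mm]?).toList := List.take_add_one
    have h3 : (l.drop (j+1))[mm]? = some (l[(j + (mm+1))]'h) := by
      rw [List.getElem?_drop]
      have he : j + 1 + mm = j + (mm + 1) := by omega
      simp only [he]
      exact List.getElem?_eq_getElem h
    rw [h1, h2, h3, List.take_succ_cons]
    simp only [List.sum_cons, List.sum_append, Option.toList_some,
      List.sum_nil]
    ring

-- rolling-sum step in A's terms
lemma pvRoll_step (nums subarray : List Int) (j : Nat) (hj : j + subarray.length < nums.length) :
    (pvWin nums subarray j).sum - PySem.List.pyGetD nums (j : Int) 0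
      + PySem.List.pyGetD nums ((j : Int) + (subarray.length : Int)) 0
    = (pvWin nums subarray (j + 1)).sum := by
  have h1 : PySem.List.pyGetD nums (j : Int) 0 = nums[j]'(by omega) := by
    rw [PySem.List.pyGetD_natCast]
    exact List.getD_eq_getElem _ _ _
  have h2 : PySem.List.pyGetD nums ((j : Int) + (subarray.length : Int)) 0
      = nums[(j + subarray.length)]'hj := by
    have hcast : (j : Int) + (subarray.length : Int) = ((j + subarray.length : Nat) : Int) := by push_cast; ring
    rw [hcast, PySem.List.pyGetD_natCast]
    exact List.getD_eq_getElem _ _ _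
  rw [h1, h2]
  exact pvSum_window_step nums j subarray.length hj

-- loop invariant for A's fold: starting at j with the correct rolling sum, the fold adds
-- one per matching window in [j, n-m) and ends with the rolling sum of the last window
lemma pvLoopA (nums subarray : List Int) (hmn : subarray.length ≤ nums.length) :
    ∀ (k j : Nat), j + k = nums.length - subarray.length → ∀ (c : Int),
    (PySem.List.pyRange (j : Int) ((nums.length : Int) - (subarray.length : Int)) 1).foldl
      (fun (st : Int × Int) i =>
        ((if st.2 = subarray.sum ∧
              PySem.List.slice nums (some i) (some (i + (subarray.length : Int))) = subarray
          then st.1 + 1 else st.1),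
         st.2 - PySem.List.pyGetD nums i 0
              + PySem.List.pyGetD nums (i + (subarray.length : Int)) 0))
      (c, (pvWin nums subarray j).sum)
    = (c + ((PySem.List.pyRange (j : Int) ((nums.length : Int) - (subarray.length : Int)) 1).map
              (fun i => if PySem.List.slice nums (some i) (some (i + (subarray.length : Int))) = subarray
                        then (1 : Int) else 0)).sum,
       (pvWin nums subarray (nums.length - subarray.length)).sum) := by
  have hcast : ((nums.length - subarray.length : Nat) : Int) = (nums.length : Int) - (subarray.length : Int) :=
    Int.ofNat_sub hmn
  intro k
  induction k with
  | zero =>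
    intro j hj c
    have hb : (nums.length : Int) - (subarray.length : Int) ≤ (j : Int) := by omega
    rw [PySem.List.pyRange_one_eq_nil hb]
    simp [show j = nums.length - subarray.length by omega]
  | succ k ih =>
    intro j hj c
    have hlt : (j : Int) < (nums.length : Int) - (subarray.length : Int) := by omega
    rw [PySem.List.pyRange_one_cons hlt, List.foldl_cons, List.map_cons, List.sum_cons]
    dsimp only
    have hco : ((pvWin nums subarray j).sum = subarray.sum ∧ pvWin nums subarray j = subarray)
        = (pvWin nums subarray j = subarray) :=
      propext ⟨And.right, fun h => ⟨by rw [h], h⟩⟩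
    simp only [pvWin_slice, hco]
    rw [pvRoll_step nums subarray j (by omega)]
    have hj1 : (j : Int) + 1 = ((j + 1 : Nat) : Int) := by push_cast; ring
    rw [hj1, ih (j+1) (by omega)]
    simp only [Prod.mk.injEq]
    refine ⟨?_, trivial⟩
    split_ifs <;> ring

-- evaluation of A when len(subarray) ≤ len(nums)
lemma pvA_eval (nums subarray : List Int) (hmn : subarray.length ≤ nums.length) :
    count_overlapping nums subarray
    = ((PySem.List.pyRange 0 ((nums.length : Int) - (subarray.length : Int)) 1).map
        (fun i => if PySem.List.slice nums (some i) (some (i + (subarray.length : Int))) = subarray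
                  then (1 : Int) else 0)).sum
      + (if (pvWin nums subarray (nums.length - subarray.length)).sum = subarray.sum ∧
            PySem.List.slice nums (some (-(subarray.length : Int))) none = subarray
         then 1 else 0) := by
  have h0 : (PySem.List.slice nums none (some (subarray.length : Int))).sum
      = (pvWin nums subarray 0).sum := by
    rw [PySem.List.slice_to_natCast]
    simp [pvWin]
  unfold count_overlapping
  dsimp only
  rw [h0]
  have hl := pvLoopA nums subarray hmn (nums.length - subarray.length) 0 (by omega) 0
  rw [Nat.cast_zero] at hl
  rw [hl]
  dsimp only
  split_ifs <;> ring

-- a 0/1 count over a range whose indicator is identically 1 sums to the range length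
lemma pvSum_ones (f : Int → Int) (b : Int) (hb : 0 ≤ b)
    (h : ∀ i ∈ PySem.List.pyRange 0 b 1, f i = 1) :
    ((PySem.List.pyRange 0 b 1).map f).sum = b := by
  rw [List.map_congr_left h, List.map_const', List.sum_replicate]
  simp [PySem.List.length_pyRange_one]
  omega

-- the empty slice nums[i:i] for 0 ≤ i
lemma pvSlice_refl (nums : List Int) (i : Int) (hi : 0 ≤ i) :
    PySem.List.slice nums (some i) (some i) = ([] : List Int) := by
  have hs := PySem.List.slice_toNat (xs := nums) hi hi
  rw [hs]
  simp

-- A returns n on D_ (its loop counts every position but the final check misses the last one)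
lemma pvA_on_D (nums : List Int) (h : nums ≠ []) :
    count_overlapping nums [] = (nums.length : Int) := by
  have hA := pvA_eval nums [] (by simp)
  simp only [List.length_nil, Nat.cast_zero, sub_zero, Nat.sub_zero, add_zero, neg_zero,
    PySem.List.slice_zero_start, PySem.List.slice_none_none, List.sum_nil] at hA
  rw [hA]
  have hw : (pvWin nums [] nums.length).sum = 0 := by simp [pvWin]
  rw [hw, if_neg (by rintro ⟨-, h2⟩; exact h h2), add_zero]
  exact pvSum_ones _ _ (by omega) (fun i hi => by
    rw [if_pos (pvSlice_refl nums i (PySem.List.mem_pyRange_one.mp hi).1)])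

-- B returns n+1 on D_
lemma pvB_on_D (nums : List Int) :
    count_overlapping_alt nums [] = (nums.length : Int) + 1 := by
  unfold count_overlapping_alt
  simp only [List.length_nil, Nat.cast_zero, sub_zero, add_zero]
  exact pvSum_ones _ _ (by omega) (fun i hi => by
    rw [if_pos (pvSlice_refl nums i (PySem.List.mem_pyRange_one.mp hi).1)])

-- the main agreement: for a nonempty pattern A and B count the same windows
lemma pvAgree (nums subarray : List Int) (hm : subarray ≠ []) :
    count_overlapping nums subarray = count_overlapping_alt nums subarray := by
  have hm1 : 0 < subarray.length := List.length_pos_of_ne_nil hm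
  by_cases hmn : subarray.length ≤ nums.length
  · -- the pattern fits: A = matches in [0, n-m) plus the last window; B = matches in [0, n-m]
    have hcast : ((nums.length - subarray.length : Nat) : Int) = (nums.length : Int) - (subarray.length : Int) :=
      Int.ofNat_sub hmn
    rw [pvA_eval nums subarray hmn]
    unfold count_overlapping_alt
    rw [PySem.List.pyRange_one_succ_right (by omega : (0:Int) ≤ (nums.length : Int) - (subarray.length : Int))]
    rw [List.map_append, List.sum_append, List.map_singleton, List.sum_singleton]
    congr 1
    have hdrop : PySem.List.slice nums (some (-(subarray.length : Int))) none
        = nums.drop (nums.length - subarray.length) :=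
      PySem.List.slice_from_neg_natCast nums subarray.length (by omega)
    have hwin : nums.drop (nums.length - subarray.length)
        = pvWin nums subarray (nums.length - subarray.length) := by
      rw [pvWin, List.take_of_length_le]
      rw [List.length_drop]; omega
    have hsl : PySem.List.slice nums (some ((nums.length : Int) - (subarray.length : Int)))
        (some ((nums.length : Int) - (subarray.length : Int) + (subarray.length : Int)))
        = pvWin nums subarray (nums.length - subarray.length) := by
      rw [← hcast]; exact pvWin_slice nums subarray (nums.length - subarray.length)
    rw [hdrop, hwin]
    have hco : ((pvWin nums subarray (nums.length - subarray.length)).sum = subarray.sum ∧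
        pvWin nums subarray (nums.length - subarray.length) = subarray)
        = (pvWin nums subarray (nums.length - subarray.length) = subarray) :=
      propext ⟨And.right, fun h => ⟨by rw [h], h⟩⟩
    simp only [hsl, hco]
  · -- the pattern is longer than nums: both counts are 0
    have hn : nums.length < subarray.length := by omega
    unfold count_overlapping count_overlapping_alt
    rw [PySem.List.pyRange_one_eq_nil (by omega : (nums.length : Int) - (subarray.length : Int) ≤ (0:Int))]
    rw [PySem.List.pyRange_one_eq_nil (by omega : (nums.length : Int) - (subarray.length : Int) + 1 ≤ (0:Int))]
    simp only [List.foldl_nil, List.map_nil, List.sum_nil]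
    rw [if_neg]
    rintro ⟨-, h2⟩
    have hdrop : PySem.List.slice nums (some (-(subarray.length : Int))) none
        = nums.drop (nums.length - subarray.length) :=
      PySem.List.slice_from_neg_natCast nums subarray.length (by omega)
    rw [hdrop] at h2
    have hlen := congrArg List.length h2
    rw [List.length_drop] at hlen
    omega

-- ===== VERDICT (by name: the statement is the Claim_ definition above) =====
theorem count_overlapping_spec : Claim_unchanged_count_overlapping := by
  intro nums subarray _ hnD
  by_cases hm : subarray = []
  · subst hm
    have hn : nums = [] := by
      by_contra hne; exact hnD ⟨rfl, hne⟩
    subst hn; rfl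
  · exact pvAgree nums subarray hm

theorem count_overlapping_changed : Claim_changed_count_overlapping := by
  unfold Claim_changed_count_overlapping; decide

theorem count_overlapping_tight : Claim_exact_count_overlapping := by
  intro nums subarray _ hD
  obtain ⟨hs, hn⟩ := hD
  subst hs
  rw [pvA_on_D nums hn, pvB_on_D nums]
  omega
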